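-- pv_equiv track=rewrite | github.com/NygilNet/leetcode-problems | dailycodingproblem/problem_217.py | isSparse
-- ===== SOURCE A (Python) =====
-- def isSparse(n: int) -> bool:
--     s = f"{n:b}"
--     last_digit_one = False
--
--     for char in s:
--         if char == "1" and last_digit_one:
--             return False
--         last_digit_one = False if char == "0" else True
--
--     return True
-- ===== SOURCE B (Python) =====
-- def isSparse(n: int) -> bool:
--     return n & (n >> 1) == 0
-- ===== Notes on version B (the rewrite author's own statement) =====
-- stated objective: simpler
-- what changed: Replaces the binary-string formatting and character loop tracking the previous digit with the single bitwise closed form n & (n >> 1) == 0, which matches A on every integer including negatives.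
import Mathlib
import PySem

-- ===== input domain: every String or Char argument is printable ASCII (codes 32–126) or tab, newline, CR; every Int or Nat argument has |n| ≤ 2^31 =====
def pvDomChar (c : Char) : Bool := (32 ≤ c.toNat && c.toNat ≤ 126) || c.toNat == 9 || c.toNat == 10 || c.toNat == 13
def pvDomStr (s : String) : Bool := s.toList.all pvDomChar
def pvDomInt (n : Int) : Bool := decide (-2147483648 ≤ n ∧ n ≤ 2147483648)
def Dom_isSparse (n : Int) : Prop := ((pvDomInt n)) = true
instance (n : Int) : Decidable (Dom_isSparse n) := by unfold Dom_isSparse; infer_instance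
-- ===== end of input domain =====

-- B replaces A's binary-string formatting and character loop with the single bitwise test n & (n >> 1) == 0 (simpler; same behaviour on every integer, negatives included).

-- ===== PORT A =====
-- binary digits of a positive Nat, most significant first (empty for 0)
def pvBits : Nat → List Char
  | 0 => []
  | n+1 => pvBits ((n+1)/2) ++ [if (n+1) % 2 = 1 then '1' else '0']
decreasing_by omega

-- f"{m:b}" for a Nat: "0" for 0, else its binary digits
def pvBinChars (m : Nat) : List Char := if m = 0 then ['0'] else pvBits m

-- A's for-loop with early return, over the characters of the string
def pvLoopA : List Char → Bool → Bool
  | [], _ => true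
  | c :: rest, last =>
    if c == '1' && last then false
    else pvLoopA rest (if c == '0' then false else true)

def isSparse (n : Int) : Bool :=
  -- f"{n:b}" prepends '-' for negative n
  let s : List Char := if n < 0 then '-' :: pvBinChars n.natAbs else pvBinChars n.natAbs
  pvLoopA s false

-- ===== PORT B =====
def isSparse_alt (n : Int) : Bool := Int.land n (Int.shiftRight n 1) == 0

-- ===== PRECONDITION & SPEC =====
def Spec_isSparse (n : Int) (out : Bool) : Prop := out = isSparse_alt n
instance (n : Int) (out : Bool) : Decidable (Spec_isSparse n out) := by unfold Spec_isSparse; infer_instance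

-- ===== CLAIM (what is proved, stated in full; the proofs are below) =====
def Claim_equal_isSparse : Prop := ∀ (n : Int), Dom_isSparse n → Spec_isSparse n (isSparse n)

-- ===== LEMMAS AND PROOFS =====

-- A's loop with its final state made visible: none = early `return False`, some b = finished with last_digit_one = b
def pvRunA : List Char → Bool → Option Bool
  | [], last => some last
  | c :: rest, last =>
    if c == '1' && last then none
    else pvRunA rest (if c == '0' then false else true)

theorem pvLoopA_eq_isSome (ds : List Char) (last : Bool) :
    pvLoopA ds last = (pvRunA ds last).isSome := by
  induction ds generalizing last with
  | nil => rfl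
  | cons c rest ih =>
    simp only [pvLoopA, pvRunA]
    split
    · rfl
    · exact ih _

theorem pvRunA_append (ds es : List Char) (last : Bool) :
    pvRunA (ds ++ es) last = (pvRunA ds last).bind (fun l => pvRunA es l) := by
  induction ds generalizing last with
  | nil => rfl
  | cons c rest ih =>
    simp only [List.cons_append, pvRunA]
    split
    · rfl
    · exact ih _

theorem pvBits_pos (n : Nat) (h : 0 < n) :
    pvBits n = pvBits (n/2) ++ [if n % 2 = 1 then '1' else '0'] := by
  cases n with
  | zero => omega
  | succ m => rw [pvBits]

-- Nat.bodd as a mod-2 test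
theorem bodd_eq_decide (n : Nat) : n.bodd = decide (n % 2 = 1) := by
  rcases Nat.even_or_odd n with h | h
  · have h0 : n % 2 = 0 := Nat.even_iff.mp h
    simp [Nat.bodd_eq_one_and_ne_zero, h0]
  · have h1 : n % 2 = 1 := Nat.odd_iff.mp h
    simp [Nat.bodd_eq_one_and_ne_zero, h1]

theorem land_bit_decomp (a b : Nat) :
    Nat.land a b = Nat.bit (a.bodd && b.bodd) (Nat.land a.div2 b.div2) := by
  conv_lhs => rw [← Nat.bit_bodd_div2 a, ← Nat.bit_bodd_div2 b]
  exact Nat.land_bit _ _ _ _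

-- the bit-level recurrence behind B's test
theorem land_div2_zero_iff (n : Nat) :
    Nat.land n (n/2) = 0 ↔ ¬(n % 2 = 1 ∧ (n/2) % 2 = 1) ∧ Nat.land (n/2) (n/2/2) = 0 := by
  rw [land_bit_decomp n (n/2), Nat.bit_eq_zero_iff]
  simp only [Nat.div2_val, bodd_eq_decide, Bool.and_eq_false_iff, decide_eq_false_iff_not]
  constructor
  · rintro ⟨h1, h2⟩
    exact ⟨by rintro ⟨ha, hb⟩; rcases h2 with h | h <;> [exact h ha; exact h hb], h1⟩
  · rintro ⟨h2, h1⟩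
    refine ⟨h1, ?_⟩
    by_cases ha : n % 2 = 1
    · exact Or.inr (fun hb => h2 ⟨ha, hb⟩)
    · exact Or.inl ha

theorem pvRunA_bits_true (n : Nat) (h : 0 < n) : pvRunA (pvBits n) true = none := by
  induction n using Nat.strong_induction_on with
  | _ n ih =>
    rw [pvBits_pos n h, pvRunA_append]
    by_cases h2 : 0 < n / 2
    · rw [ih (n/2) (by omega) h2]
      rfl
    · have hn1 : n = 1 := by omega
      subst hn1
      norm_num [pvBits, pvRunA]

theorem pvRunA_bits_false (n : Nat) (h : 0 < n) :
    pvRunA (pvBits n) false =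
      if Nat.land n (n/2) = 0 then some (n % 2 == 1) else none := by
  induction n using Nat.strong_induction_on with
  | _ n ih =>
    rw [pvBits_pos n h, pvRunA_append]
    by_cases h2 : 0 < n / 2
    · rw [ih (n/2) (by omega) h2]
      by_cases hl2 : Nat.land (n/2) (n/2/2) = 0
      · have hiff := land_div2_zero_iff n
        by_cases ha : n % 2 = 1 <;> by_cases hb : (n/2) % 2 = 1
        · -- adjacent ones: loop returns False, land ≠ 0
          have hland : ¬ Nat.land n (n/2) = 0 := by
            intro hz; exact ((hiff.mp hz).1 ⟨ha, hb⟩)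
          simp [hl2, hland, hb, ha, pvRunA]
        · have hland : Nat.land n (n/2) = 0 := hiff.mpr ⟨by tauto, hl2⟩
          simp [hl2, hland, hb, ha, pvRunA]
        · have hland : Nat.land n (n/2) = 0 := hiff.mpr ⟨by tauto, hl2⟩
          have ha0 : n % 2 = 0 := by omega
          simp [hl2, hland, ha0, pvRunA]
        · have hland : Nat.land n (n/2) = 0 := hiff.mpr ⟨by tauto, hl2⟩
          have ha0 : n % 2 = 0 := by omega
          simp [hl2, hland, ha0, pvRunA]
      · have hland : ¬ Nat.land n (n/2) = 0 := by
          intro hz; exact hl2 ((land_div2_zero_iff n).mp hz).2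
        simp [hl2, hland]
    · have hn1 : n = 1 := by omega
      subst hn1
      norm_num [pvBits, pvRunA, Nat.land]
      decide

theorem isSparse_eq_alt (n : Int) : isSparse n = isSparse_alt n := by
  cases n with
  | ofNat m =>
    cases m with
    | zero => decide
    | succ k =>
      have hnn : ¬ (Int.ofNat (k+1) < 0) := Int.not_lt.mpr (Int.natCast_nonneg _)
      rw [isSparse]
      simp only [if_neg hnn]
      rw [show (Int.ofNat (k+1)).natAbs = k+1 from rfl]
      rw [show pvBinChars (k+1) = pvBits (k+1) by simp [pvBinChars]]
      rw [pvLoopA_eq_isSome, pvRunA_bits_false (k+1) (by omega)]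
      have hB : isSparse_alt (Int.ofNat (k+1))
          = (Int.ofNat (Nat.land (k+1) ((k+1) >>> 1)) == 0) := rfl
      rw [hB, Nat.shiftRight_one]
      by_cases hl : Nat.land (k+1) ((k+1)/2) = 0
      · simp [hl]
      · simp [hl]
  | negSucc m =>
    have hneg : Int.negSucc m < 0 := Int.negSucc_lt_zero m
    have hA : isSparse (Int.negSucc m) = pvLoopA (pvBits (m+1)) true := by
      rw [isSparse]
      simp only [if_pos hneg, Int.natAbs_negSucc]
      rw [show pvBinChars (m+1) = pvBits (m+1) by simp [pvBinChars]]
      simp [pvLoopA]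
    rw [hA, pvLoopA_eq_isSome, pvRunA_bits_true (m+1) (by omega)]
    have hB : isSparse_alt (Int.negSucc m)
        = (Int.negSucc (Nat.lor m (m >>> 1)) == 0) := rfl
    rw [hB]
    simp

-- ===== VERDICT (by name: the statement is the Claim_ definition above) =====
theorem isSparse_spec : Claim_equal_isSparse := by
  intro n _
  unfold Spec_isSparse
  exact isSparse_eq_alt n
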